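-- pv_equiv track=rewrite | github.com/Delisseu/Euler-s-Project | Features/MathOperations.py | diophantine_equation
-- ===== SOURCE A (Python) =====
-- import math
--
-- def sqrt_approx(num: int) -> tuple[int, list[int]]:
--     """
--     Вычисляет период разложения в цепную дробь для квадратного корня числа.
--
--     :param num: Целое число, для которого вычисляется период.
--     :return: Список коэффициентов цепной дроби (без начального члена).
--     """
--     a0 = math.isqrt(num)  # Целая часть корня
--     if a0 * a0 == num:
--         return a0, []  # Полный квадрат — нет периода
--
--     m, d, a = 0, 1, a0
--     seen = set()  # Храним состояния (m, d, a), чтобы отследить цикл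
--     period = []
--
--     while (m, d, a) not in seen:
--         seen.add((m, d, a))
--         m = d * a - m
--         d = (num - m * m) // d
--         a = (a0 + m) // d
--         period.append(a)
--
--     return a0, period[:-1]
--
-- def diophantine_equation(d: int) -> tuple[int, int, int]:
--     """
--     Ищет максимальное значение x и соответствующее ему y среди решений уравнения Пелля:
--         x^2 - D * y^2 = 1
--     для всех значений 3 <= D <= d.
--
--     Метод:
--     - Использует разложение в цепную дробь для поиска фундаментального решения.
--     - Если период нечётный, используем весь период.
--     - Если период чётный, отбрасываем последний элемент периода.
--
--     :param d: Верхняя граница диапазона значений D (целое число > 2).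
--     :return: Кортеж (max_x, max_y), где max_x — наибольшее найденное x, а max_y — соответствующее y.
--     """
--     max_x = max_y = max_d = 0
--     for d_val in range(2, d + 1):
--         a0, d_period = sqrt_approx(d_val)
--         if not d_period:
--             continue  # D — полный квадрат, решений нет
--
--         # Корректировка периода в зависимости от чётности его длины
--         if len(d_period) % 2 == 0:
--             d_period.pop()
--
--         x, y = period_approx(a0, d_period)
--         if x > max_x:
--
--             max_x, max_y, max_d = x, y, d_val
--
--     return max_x, max_d, max_y
--
-- def period_approx(a0: int, period: (tuple[int], iter, list[int])) -> tuple[int, int]: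
--     """
--         Строит подходящую дробь, соответствующую фундаментальному решению уравнения Пелля.
--
--         :param a0: Целая часть квадратного корня (из sqrt_approx).
--         :param period: Периодическая часть разложения (без последнего элемента, если период чётный).
--         :return: Кортеж (x, y), где x и y — решение уравнения x^2 - D * y^2 = 1.
--         """
--     # Начальные значения для дробей
--     q, p = 1, a0
--     prev_q_2, prev_q = 0, 1
--     prev_p_2, prev_p = 1, a0
--
--     for a in period:
--         p, q = a * prev_p + prev_p_2, a * prev_q + prev_q_2
--         prev_p_2, prev_p = prev_p, p
--         prev_q_2, prev_q = prev_q, q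
--
--     return p, q
-- ===== SOURCE B (Python) =====
-- import math
--
-- def diophantine_equation(d: int) -> tuple[int, int, int]:
--     """One fused pass per D: run the continued-fraction state machine for sqrt(D)
--     while maintaining the convergent numerators/denominators in O(1) space
--     (no period list, no trimming/pop, no helper functions)."""
--     max_x = max_d = max_y = 0
--     for d_val in range(2, d + 1):
--         a0 = math.isqrt(d_val)
--         if a0 * a0 == d_val:
--             continue
--         m, den, a = 0, 1, a0
--         h2, h1, k2, k1 = 1, a0, 0, 1   # convergents c_{-1}, c_0
--         g2, l2 = 1, 0                  # numerator/denominator one step further back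
--         n = 0
--         seen = set()
--         while (m, den, a) not in seen:
--             seen.add((m, den, a))
--             m = den * a - m
--             den = (d_val - m * m) // den
--             a = (a0 + m) // den
--             g2, l2 = h2, k2
--             h2, h1 = h1, a * h1 + h2
--             k2, k1 = k1, a * k1 + k2
--             n += 1
--         x, y = (h2, k2) if n % 2 == 0 else (g2, l2)
--         if x > max_x:
--             max_x, max_d, max_y = x, d_val, y
--     return max_x, max_d, max_y
-- ===== Notes on version B (the rewrite author's own statement) =====
-- stated objective: alternative
-- what changed: B fuses A's two-phase per-D pipeline (build the continued-fraction period list in sqrt_approx, trim it, pop on even length, then fold the convergents over it in the period_approx helper) into a single loop that runs the CF state machine while maintaining the convergent numerators/denominators in O(1) extra space, picking the fundamental solution from the retained registers by step-count parity.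
import Mathlib
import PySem

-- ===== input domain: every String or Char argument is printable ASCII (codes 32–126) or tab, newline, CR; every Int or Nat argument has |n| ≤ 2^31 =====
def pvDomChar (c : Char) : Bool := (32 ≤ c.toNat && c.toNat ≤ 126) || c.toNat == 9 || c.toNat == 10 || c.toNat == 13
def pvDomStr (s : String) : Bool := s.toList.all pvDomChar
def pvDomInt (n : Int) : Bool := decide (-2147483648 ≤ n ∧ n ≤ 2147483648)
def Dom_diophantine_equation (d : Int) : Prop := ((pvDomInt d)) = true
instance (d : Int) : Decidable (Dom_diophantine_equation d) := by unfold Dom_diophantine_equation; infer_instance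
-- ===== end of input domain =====

-- B replaces A's two-phase per-D pipeline (build the CF period list, trim, parity-pop, then fold
-- convergents over it in a helper) by one fused loop maintaining the convergents in O(1) space;
-- objective: alternative (same asymptotic cost).

-- ===== PORT A =====
-- math.isqrt ported by hand (PySem has no isqrt): exact floor square root for every
-- 0 ≤ n ≤ 2^31 (binary search halves [1, n] each step; 64 steps are more than enough),
-- used identically by both ports; math.isqrt is only ever called on num ≥ 2 here
def isqrtBS : Nat → Int → Int → Int → Int
  | 0, lo, _, _ => lo
  | f + 1, lo, hi, n =>
    if lo + 1 < hi then
      let mid := PySem.Int.floordiv (lo + hi) 2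
      if mid * mid ≤ n then isqrtBS f mid hi n else isqrtBS f lo mid n
    else lo

def pyIsqrt (n : Int) : Int := if n < 4 then (if n < 1 then 0 else 1) else isqrtBS 64 1 n n

-- the continued-fraction state update shared verbatim by both Pythons:
--   m = d*a - m; d = (num - m*m) // d; a = (a0 + m) // d
def cfNext (num a0 m den a : Int) : Int × Int × Int :=
  let m' := den * a - m
  let den' := PySem.Int.floordiv (num - m' * m') den
  let a' := PySem.Int.floordiv (a0 + m') den'
  (m', den', a')

-- fuel bound for the while-loops (both Pythons terminate; the bound is generous and shared)
def pellFuel (num : Int) : Nat := (num.toNat + 2) ^ 3 + 2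

-- the 'while (m, d, a) not in seen' loop of sqrt_approx; none = fuel exhausted (unreachable in Python)
def sqrtApproxLoop : Nat → Int → Int → Int → Int → Int → PySem.Set (Int × Int × Int) → List Int → Option (List Int)
  | 0, _, _, _, _, _, _, _ => none
  | fuel + 1, num, a0, m, den, a, seen, period =>
    if PySem.Set.contains seen (m, den, a) then some period
    else
      match cfNext num a0 m den a with
      | (m', den', a') =>
        sqrtApproxLoop fuel num a0 m' den' a' (PySem.Set.add seen (m, den, a)) (period ++ [a'])

def sqrt_approx (num : Int) : Option (Int × List Int) :=
  let a0 : Int := pyIsqrt num  -- math.isqrt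
  if a0 * a0 == num then some (a0, [])
  else
    match sqrtApproxLoop (pellFuel num) num a0 0 1 a0 PySem.Set.empty [] with
    | none => none
    | some period => some (a0, period.dropLast)

def period_approx (a0 : Int) (period : List Int) : Int × Int :=
  -- state (prev_q_2, prev_q, prev_p_2, prev_p); the Python's p, q always equal prev_p, prev_q
  -- after the shift, so the fold state carries exactly the live variables
  let st := period.foldl
    (fun (s : Int × Int × Int × Int) a =>
      (s.2.1, a * s.2.1 + s.1, s.2.2.2, a * s.2.2.2 + s.2.2.1))
    (0, 1, 1, a0)
  (st.2.2.2, st.2.1)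

def diophantine_equation (d : Int) : Int × Int × Int :=
  let st := (PySem.List.pyRange 2 (d + 1) 1).foldl
    (fun (st : Int × Int × Int) d_val =>
      match sqrt_approx d_val with
      | none => st
      | some (a0, d_period) =>
        if d_period.isEmpty then st
        else
          let dp := if d_period.length % 2 == 0 then d_period.dropLast else d_period
          let xy := period_approx a0 dp
          if st.1 < xy.1 then (xy.1, xy.2, d_val) else st)
    (0, 0, 0)
  (st.1, st.2.2, st.2.1)

-- ===== PORT B =====
-- the fused while-loop of Source B: CF state machine plus convergent numerators/denominators
-- h2,h1 / k2,k1 and the one-step-back pair g2,l2, with the step counter n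
def altLoop : Nat → Int → Int → Int → Int → Int → PySem.Set (Int × Int × Int) →
    Int → Int → Int → Int → Int → Int → Int → Option (Int × Int × Int × Int × Int)
  | 0, _, _, _, _, _, _, _, _, _, _, _, _, _ => none
  | fuel + 1, num, a0, m, den, a, seen, h2, h1, k2, k1, _g2, _l2, n =>
    if PySem.Set.contains seen (m, den, a) then some (h2, k2, _g2, _l2, n)
    else
      match cfNext num a0 m den a with
      | (m', den', a') =>
        altLoop fuel num a0 m' den' a' (PySem.Set.add seen (m, den, a))
          h1 (a' * h1 + h2) k1 (a' * k1 + k2) h2 k2 (n + 1)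

def diophantine_equation_alt (d : Int) : Int × Int × Int :=
  (PySem.List.pyRange 2 (d + 1) 1).foldl
    (fun (st : Int × Int × Int) d_val =>
      let a0 : Int := pyIsqrt d_val  -- math.isqrt
      if a0 * a0 == d_val then st
      else
        match altLoop (pellFuel d_val) d_val a0 0 1 a0 PySem.Set.empty 1 a0 0 1 1 0 0 with
        | none => st
        | some r =>
          let xy := if PySem.Int.mod r.2.2.2.2 2 == 0 then (r.1, r.2.1) else (r.2.2.1, r.2.2.2.1)
          if st.1 < xy.1 then (xy.1, d_val, xy.2) else st)
    (0, 0, 0)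

-- ===== PRECONDITION & SPEC =====
def Spec_diophantine_equation (d : Int) (out : Int × Int × Int) : Prop := out = diophantine_equation_alt d
instance (d : Int) (out : Int × Int × Int) : Decidable (Spec_diophantine_equation d out) := by unfold Spec_diophantine_equation; infer_instance

-- ===== CLAIM (what is proved, stated in full; the proofs are below) =====
def Claim_equal_diophantine_equation : Prop := ∀ (d : Int), Dom_diophantine_equation d → Spec_diophantine_equation d (diophantine_equation d)

-- ===== LEMMAS AND PROOFS =====

theorem le_isqrtBS (f : Nat) : ∀ (lo hi n : Int), lo ≤ isqrtBS f lo hi n := by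
  induction f with
  | zero => intro lo hi n; simp [isqrtBS]
  | succ f ih =>
    intro lo hi n
    simp only [isqrtBS]
    split_ifs with h1 h2
    · have hm := PySem.Int.floordiv_two_mid_bounds (lo := lo) (hi := hi) (by omega)
      exact le_trans hm.1 (ih _ _ _)
    · exact ih _ _ _
    · exact le_refl lo

theorem one_le_pyIsqrt (n : Int) (h : 2 ≤ n) : 1 ≤ pyIsqrt n := by
  unfold pyIsqrt
  split_ifs with h1 h2
  · omega
  · omega
  · exact le_isqrtBS 64 1 n n


-- convergent fold: state (prev_q_2, prev_q, prev_p_2, prev_p), shared shape of both ports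
def f4 (a0 : Int) (l : List Int) : Int × Int × Int × Int :=
  l.foldl (fun s a => (s.2.1, a * s.2.1 + s.1, s.2.2.2, a * s.2.2.2 + s.2.2.1)) (0, 1, 1, a0)

theorem f4_concat (a0 x : Int) (l : List Int) :
    f4 a0 (l ++ [x]) = ((f4 a0 l).2.1, x * (f4 a0 l).2.1 + (f4 a0 l).1,
      (f4 a0 l).2.2.2, x * (f4 a0 l).2.2.2 + (f4 a0 l).2.2.1) := by
  simp [f4, List.foldl_append]

theorem period_approx_f4 (a0 : Int) (l : List Int) :
    period_approx a0 l = ((f4 a0 l).2.2.2, (f4 a0 l).2.1) := rfl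

theorem f4_shift (a0 : Int) (l : List Int) (h : l ≠ []) :
    (f4 a0 l).2.2.1 = (f4 a0 l.dropLast).2.2.2 ∧ (f4 a0 l).1 = (f4 a0 l.dropLast).2.1 := by
  constructor <;>
    (conv_lhs => rw [← List.dropLast_append_getLast h, f4_concat])

-- the fused loop of B simulates A's period-building loop: its convergent registers are
-- exactly the f4-fold of the period accumulated so far (and of its dropLast), n its length
theorem loop_rel (num a0 : Int) (fuel : Nat) :
    ∀ (m den a : Int) (seen : PySem.Set (Int × Int × Int)) (acc : List Int),
    altLoop fuel num a0 m den a seen (f4 a0 acc).2.2.1 (f4 a0 acc).2.2.2 (f4 a0 acc).1 (f4 a0 acc).2.1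
        (f4 a0 acc.dropLast).2.2.1 (f4 a0 acc.dropLast).1 (acc.length : Int)
      = (sqrtApproxLoop fuel num a0 m den a seen acc).map
          (fun P => ((f4 a0 P).2.2.1, (f4 a0 P).1, (f4 a0 P.dropLast).2.2.1, (f4 a0 P.dropLast).1,
            (P.length : Int))) := by
  induction fuel with
  | zero => intro m den a seen acc; rfl
  | succ fuel ih =>
    intro m den a seen acc
    simp only [altLoop, sqrtApproxLoop]
    cases hc : PySem.Set.contains seen (m, den, a)
    · simp only [Bool.false_eq_true, if_false, cfNext]
      have := ih (den * a - m)
        (PySem.Int.floordiv (num - (den * a - m) * (den * a - m)) den)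
        (PySem.Int.floordiv (a0 + (den * a - m)) (PySem.Int.floordiv (num - (den * a - m) * (den * a - m)) den))
        (PySem.Set.add seen (m, den, a))
        (acc ++ [PySem.Int.floordiv (a0 + (den * a - m)) (PySem.Int.floordiv (num - (den * a - m) * (den * a - m)) den)])
      simpa [f4_concat, List.dropLast_concat] using this
    · simp

theorem saLoop_mono (num a0 : Int) (fuel : Nat) :
    ∀ (m den a : Int) (seen : PySem.Set (Int × Int × Int)) (acc P : List Int),
    sqrtApproxLoop fuel num a0 m den a seen acc = some P → acc.length ≤ P.length := by
  induction fuel with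
  | zero => intro m den a seen acc P h; simp [sqrtApproxLoop] at h
  | succ fuel ih =>
    intro m den a seen acc P h
    simp only [sqrtApproxLoop, cfNext] at h
    cases hc : PySem.Set.contains seen (m, den, a) <;> simp only [hc] at h
    · simp only [Bool.false_eq_true, if_false] at h
      have := ih _ _ _ _ _ _ h
      rw [List.length_append] at this
      simp only [List.length_cons, List.length_nil] at this
      omega
    · simp only [if_true] at h
      simp at h
      rw [h]
      
theorem saLoop_len2 (num a0 : Int) (ha0 : 1 ≤ a0) (P : List Int)
    (h : sqrtApproxLoop (pellFuel num) num a0 0 1 a0 PySem.Set.empty [] = some P) :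
    2 ≤ P.length := by
  obtain ⟨k, hk⟩ : ∃ k, pellFuel num = k + 1 + 1 := ⟨(num.toNat + 2) ^ 3, by unfold pellFuel; ring⟩
  rw [hk] at h
  have hne : a0 ≠ 0 := by omega
  simp only [sqrtApproxLoop, cfNext] at h
  simp only [one_mul, sub_zero] at h
  rw [show PySem.Set.contains PySem.Set.empty ((0:Int), (1:Int), a0) = false from rfl] at h
  simp only [Bool.false_eq_true, if_false] at h
  have hc2 : PySem.Set.contains (PySem.Set.add PySem.Set.empty ((0:Int), (1:Int), a0))
      (a0, PySem.Int.floordiv (num - a0 * a0) 1,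
        PySem.Int.floordiv (a0 + a0) (PySem.Int.floordiv (num - a0 * a0) 1)) = false := by
    simp [PySem.Set.add, PySem.Set.contains, hne]
  rw [hc2] at h
  simp only [Bool.false_eq_true, if_false] at h
  have := saLoop_mono num a0 k _ _ _ _ _ _ h
  simpa using this

-- per-element bodies of the two top-level folds (names for the proofs only)
def bodyA (st : Int × Int × Int) (d_val : Int) : Int × Int × Int :=
  match sqrt_approx d_val with
  | none => st
  | some (a0, d_period) =>
    if d_period.isEmpty then st
    else
      let dp := if d_period.length % 2 == 0 then d_period.dropLast else d_period
      let xy := period_approx a0 dp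
      if st.1 < xy.1 then (xy.1, xy.2, d_val) else st

def bodyB (st : Int × Int × Int) (d_val : Int) : Int × Int × Int :=
  let a0 : Int := pyIsqrt d_val
  if a0 * a0 == d_val then st
  else
    match altLoop (pellFuel d_val) d_val a0 0 1 a0 PySem.Set.empty 1 a0 0 1 1 0 0 with
    | none => st
    | some r =>
      let xy := if PySem.Int.mod r.2.2.2.2 2 == 0 then (r.1, r.2.1) else (r.2.2.1, r.2.2.2.1)
      if st.1 < xy.1 then (xy.1, d_val, xy.2) else st

def sw (s : Int × Int × Int) : Int × Int × Int := (s.1, s.2.2, s.2.1)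

theorem body_sw (d_val : Int) (h2d : 2 ≤ d_val) (st : Int × Int × Int) :
    bodyB (sw st) d_val = sw (bodyA st d_val) := by
  have ha0 : (1 : Int) ≤ pyIsqrt d_val := one_le_pyIsqrt d_val h2d
  unfold bodyA bodyB sqrt_approx
  cases hsq : (pyIsqrt d_val * pyIsqrt d_val == d_val) with
  | true => simp at hsq; simp [hsq]
  | false =>
    simp only [hsq, Bool.false_eq_true, if_false]
    have hrel := loop_rel d_val (pyIsqrt d_val) (pellFuel d_val) 0 1
      (pyIsqrt d_val) PySem.Set.empty []
    cases hL : sqrtApproxLoop (pellFuel d_val) d_val (pyIsqrt d_val) 0 1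
        (pyIsqrt d_val) PySem.Set.empty [] with
    | none =>
      have hrel' : altLoop (pellFuel d_val) d_val (pyIsqrt d_val) 0 1
          (pyIsqrt d_val) PySem.Set.empty 1 (pyIsqrt d_val)
          0 1 1 0 0 = none := by
        rw [hL] at hrel
        simpa [f4] using hrel
      rw [hrel']
    | some P =>
      have hP2 := saLoop_len2 d_val _ ha0 P hL
      have hrel' : altLoop (pellFuel d_val) d_val (pyIsqrt d_val) 0 1
          (pyIsqrt d_val) PySem.Set.empty 1 (pyIsqrt d_val)
          0 1 1 0 0 = some ((f4 (pyIsqrt d_val) P).2.2.1,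
            (f4 (pyIsqrt d_val) P).1,
            (f4 (pyIsqrt d_val) P.dropLast).2.2.1,
            (f4 (pyIsqrt d_val) P.dropLast).1, (P.length : Int)) := by
        rw [hL] at hrel
        simpa [f4] using hrel
      rw [hrel']
      have hPne : P ≠ [] := by intro h; rw [h] at hP2; simp at hP2
      have hPd : P.dropLast ≠ [] := by
        have hld : P.dropLast.length = P.length - 1 := List.length_dropLast
        intro hnil
        rw [hnil] at hld
        simp at hld
        omega
      have hEmp : P.dropLast.isEmpty = false := by simp [hPd]
      have hmod : PySem.Int.mod (P.length : Int) 2 = ((P.length % 2 : Nat) : Int) := by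
        exact_mod_cast PySem.Int.mod_natCast P.length 2
      by_cases hp : P.length % 2 = 0
      · have hA : (P.dropLast.length % 2 == 0) = false := by
          simp only [List.length_dropLast, beq_eq_false_iff_ne, ne_eq]
          omega
        have hB : (PySem.Int.mod (P.length : Int) 2 == 0) = true := by
          rw [hmod, hp]; simp
        have hsh := f4_shift (pyIsqrt d_val) P hPne
        simp only [hEmp, hA, hB, Bool.false_eq_true, if_false, if_true, period_approx_f4]
        rw [hsh.1, hsh.2]
        split_ifs <;> simp_all [sw]
      · have hA : (P.dropLast.length % 2 == 0) = true := by
          simp only [List.length_dropLast, beq_iff_eq]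
          omega
        have hB : (PySem.Int.mod (P.length : Int) 2 == 0) = false := by
          rw [hmod]
          simp only [beq_eq_false_iff_ne, ne_eq]
          intro hcon
          exact hp (by exact_mod_cast hcon)
        have hsh := f4_shift (pyIsqrt d_val) P.dropLast hPd
        simp only [hEmp, hA, hB, Bool.false_eq_true, if_false, if_true, period_approx_f4]
        rw [hsh.1, hsh.2]
        split_ifs <;> simp_all [sw]

theorem foldl_sw (l : List Int) (hl : ∀ x ∈ l, 2 ≤ x) (st : Int × Int × Int) :
    l.foldl bodyB (sw st) = sw (l.foldl bodyA st) := by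
  induction l generalizing st with
  | nil => simp
  | cons x l ih =>
    simp only [List.foldl_cons]
    rw [body_sw x (hl x (by simp)) st]
    exact ih (fun y hy => hl y (by simp [hy])) _

theorem A_as_fold (d : Int) :
    diophantine_equation d = sw ((PySem.List.pyRange 2 (d + 1) 1).foldl bodyA (0, 0, 0)) := rfl

theorem B_as_fold (d : Int) :
    diophantine_equation_alt d = (PySem.List.pyRange 2 (d + 1) 1).foldl bodyB (0, 0, 0) := rfl


-- ===== VERDICT (by name: the statement is the Claim_ definition above) =====
theorem diophantine_equation_spec : Claim_equal_diophantine_equation := by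
  intro d _
  unfold Spec_diophantine_equation
  rw [A_as_fold, B_as_fold]
  exact (foldl_sw _ (fun x hx => (PySem.List.mem_pyRange_one.mp hx).1) (0, 0, 0)).symm
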